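-- pv_equiv track=rewrite | github.com/dobrso/AaDS | Classworks/22.05.2025 CW/Task 1.py | hasHamiltonianPath
-- ===== SOURCE A (Python) =====
-- from typing import List
--
-- def hasHamiltonianPath(G) -> bool:
--     def topologicalSort(G) -> List[int]:
--         n = len(G)
--         visited = [False] * n
--         stack = []
--
--         def DFS(v: int) -> None:
--             visited[v] = True
--             for neighbor in G[v]:
--                 if not visited[neighbor]:
--                     DFS(neighbor)
--             stack.append(v)
--
--         for v in range(n):
--             if not visited[v]:
--                 DFS(v)
--
--         stack = stack[::-1]
--         return stack
--
--     topOrder = topologicalSort(G)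
--
--     for i in range(len(topOrder) - 1):
--         u = topOrder[i]
--         v = topOrder[i+1]
--         if v not in G[u]:
--             return False
--
--     return True
-- ===== SOURCE B (Python) =====
-- def hasHamiltonianPath(G) -> bool:
--     # Iterative DFS with an explicit frame stack (vertex, next-neighbour index)
--     # and mark-on-push, producing the same finish order as A's recursion without
--     # recursion; the adjacency check scans the finish order forward, so the
--     # reversed topological list is never built.
--     n = len(G)
--     color = [False] * n
--     order = []  # vertices in finish order (oldest first)
--     for s in range(n):
--         if color[s]:
--             continue
--         color[s] = True
--         stack = [(s, 0)]
--         while stack: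
--             v, i = stack[-1]
--             if i < len(G[v]):
--                 stack[-1] = (v, i + 1)
--                 w = G[v][i]
--                 if not color[w]:
--                     color[w] = True
--                     stack.append((w, 0))
--             else:
--                 stack.pop()
--                 order.append(v)
--     for k in range(1, len(order)):
--         if order[k - 1] not in G[order[k]]:
--             return False
--     return True
-- ===== Notes on version B (the rewrite author's own statement) =====
-- stated objective: alternative
-- what changed: B replaces A's recursive inner DFS by an iterative DFS driven by an explicit stack of (vertex, next-neighbour-index) frames with mark-on-push, producing the same finish order without recursion, and checks consecutive adjacency by scanning the finish order forward instead of reversing it first.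
import Mathlib
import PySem

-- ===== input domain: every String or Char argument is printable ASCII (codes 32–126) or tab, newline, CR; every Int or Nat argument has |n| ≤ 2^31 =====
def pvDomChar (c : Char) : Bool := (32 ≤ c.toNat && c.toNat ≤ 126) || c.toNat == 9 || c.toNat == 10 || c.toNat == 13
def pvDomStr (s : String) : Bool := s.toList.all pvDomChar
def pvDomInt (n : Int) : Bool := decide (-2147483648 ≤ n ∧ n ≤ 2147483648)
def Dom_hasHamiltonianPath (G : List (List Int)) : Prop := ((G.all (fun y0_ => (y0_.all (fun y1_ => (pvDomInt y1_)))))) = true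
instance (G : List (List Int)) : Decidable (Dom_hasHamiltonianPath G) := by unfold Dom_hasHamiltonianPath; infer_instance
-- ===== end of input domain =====

-- B replaces A's recursive DFS by an iterative DFS over an explicit frame stack
-- (vertex, next-neighbour index) with mark-on-push, and scans the finish order
-- forward instead of building the reversed list; objective: alternative (same cost).


-- ===== PORT A =====
-- A's recursive DFS; the Nat fuel is only a totality guard (each nested call visits a
-- fresh vertex, so fuel = n+1 at the top is never exhausted on inputs satisfying Pre_).
mutual
def dfsA (G : List (List Int)) (fuel : Nat) (v : Int) (vis : List Bool) (st : List Int) :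
    List Bool × List Int :=
  match fuel with
  | 0 => (vis, st)
  | f + 1 =>
    let vis1 := PySem.List.pySetD vis v true                -- visited[v] = True
    let r := dfsANbrs G f (PySem.List.pyGetD G v []) vis1 st -- for neighbor in G[v]: …
    (r.1, r.2 ++ [v])                                        -- stack.append(v)
termination_by (fuel, 0)

def dfsANbrs (G : List (List Int)) (fuel : Nat) (ns : List Int) (vis : List Bool)
    (st : List Int) : List Bool × List Int :=
  match ns with
  | [] => (vis, st)
  | w :: rest =>
    if PySem.List.pyGetD vis w false then dfsANbrs G fuel rest vis st
    else
      let r := dfsA G fuel w vis st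
      dfsANbrs G fuel rest r.1 r.2
termination_by (fuel, ns.length + 1)
end

-- for i in range(len(topOrder)-1): u, v consecutive; if v not in G[u]: return False
def checkA (G : List (List Int)) : List Int → Bool
  | u :: v :: rest =>
    if !((PySem.List.pyGetD G u []).contains v) then false else checkA G (v :: rest)
  | _ => true

def hasHamiltonianPath (G : List (List Int)) : Bool :=
  let n := G.length
  let s := (PySem.List.pyRange 0 (n : Int) 1).foldl
    (fun (acc : List Bool × List Int) v =>
      if PySem.List.pyGetD acc.1 v false then acc
      else dfsA G (n + 1) v acc.1 acc.2)
    (List.replicate n false, [])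
  let topOrder := (PySem.List.slice? s.2 none none (-1)).getD []   -- stack[::-1]
  checkA G topOrder

-- ===== PORT B =====
-- B's while loop over the explicit frame stack (top = head); the Nat fuel is only a
-- totality guard (the loop does at most (n+1)*(E+2) iterations on inputs satisfying Pre_).
def loopB (G : List (List Int)) (fuel : Nat) (stack : List (Int × Int))
    (vis : List Bool) (ord : List Int) : List Bool × List Int :=
  match fuel with
  | 0 => (vis, ord)
  | f + 1 =>
    match stack with
    | [] => (vis, ord)                                       -- while stack: (exit)
    | (v, i) :: rest =>
      let ns := PySem.List.pyGetD G v []                     -- G[v]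
      if i < (ns.length : Int) then
        let w := PySem.List.pyGetD ns i 0                    -- w = G[v][i] (0 ≤ i < len here, exact)
        if PySem.List.pyGetD vis w false then
          loopB G f ((v, i + 1) :: rest) vis ord             -- stack[-1] = (v, i+1)
        else
          loopB G f ((w, 0) :: (v, i + 1) :: rest)
            (PySem.List.pySetD vis w true) ord               -- color[w] = True; push (w, 0)
      else
        loopB G f rest vis (ord ++ [v])                      -- stack.pop(); order.append(v)

-- for k in range(1, len(order)): if order[k-1] not in G[order[k]]: return False
def checkB (G : List (List Int)) : List Int → Bool
  | a :: b :: rest =>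
    if !((PySem.List.pyGetD G b []).contains a) then false else checkB G (b :: rest)
  | _ => true

def hasHamiltonianPath_alt (G : List (List Int)) : Bool :=
  let n := G.length
  let E := (G.map List.length).sum
  let s := (PySem.List.pyRange 0 (n : Int) 1).foldl
    (fun (acc : List Bool × List Int) v =>
      if PySem.List.pyGetD acc.1 v false then acc            -- if color[s]: continue
      else loopB G ((n + 1) * (E + 2)) [(v, 0)]
             (PySem.List.pySetD acc.1 v true) acc.2)         -- color[s] = True; stack = [(s,0)]
    (List.replicate n false, [])
  checkB G s.2

-- ===== PRECONDITION & SPEC =====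
-- Pre_ excludes exactly the inputs where Python A raises IndexError: a neighbour entry
-- that is not a valid (possibly negative) index into the vertex list.
def Pre_hasHamiltonianPath (G : List (List Int)) : Prop :=
  ∀ row ∈ G, ∀ w ∈ row, PySem.Raise.InRange G.length w
instance (G : List (List Int)) : Decidable (Pre_hasHamiltonianPath G) := by
  unfold Pre_hasHamiltonianPath; infer_instance

def pvWitness_hasHamiltonianPath : List (List Int) := [[1], [2], []]

def Spec_hasHamiltonianPath (G : List (List Int)) (out : Bool) : Prop := out = hasHamiltonianPath_alt G
instance (G : List (List Int)) (out : Bool) : Decidable (Spec_hasHamiltonianPath G out) := by unfold Spec_hasHamiltonianPath; infer_instance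

-- ===== CLAIM (what is proved, stated in full; the proofs are below) =====
def Claim_equal_hasHamiltonianPath : Prop := ∀ (G : List (List Int)), Dom_hasHamiltonianPath G → Pre_hasHamiltonianPath G → Spec_hasHamiltonianPath G (hasHamiltonianPath G)

-- ===== LEMMAS AND PROOFS =====

-- number of still-unvisited entries
def fcnt (vis : List Bool) : Nat := vis.count false

-- steps the frame (v, i) can still take before being popped, plus the pop itself
def frameCost (G : List (List Int)) (p : Int × Int) : Nat :=
  (PySem.List.pyGetD G p.1 []).length + 1 - p.2.toNat

-- upper bound on the number of remaining loop iterations of B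
def costB (G : List (List Int)) (stack : List (Int × Int)) (vis : List Bool) : Nat :=
  (stack.map (frameCost G)).sum + fcnt vis * ((G.map List.length).sum + 2)

-- every frame holds an in-range vertex and a neighbour index 0 ≤ i ≤ len(G[v])
def stackOK (G : List (List Int)) : List (Int × Int) → Prop := fun stack =>
  ∀ (v i : Int), (v, i) ∈ stack → PySem.Raise.InRange G.length v ∧ 0 ≤ i ∧
    i.toNat ≤ (PySem.List.pyGetD G v []).length

theorem loopB_nil (G : List (List Int)) (f : Nat) (vis : List Bool) (ord : List Int) :
    loopB G f [] vis ord = (vis, ord) := by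
  cases f <;> rfl

-- wrapped index access: an in-range Int index is a single Nat index
theorem inRange_idx {n : Nat} {w : Int} (hw : PySem.Raise.InRange n w) :
    ∃ j : Nat, PySem.List.pyIdx? n w = some j ∧ j < n := by
  obtain ⟨h1, h2⟩ := hw
  unfold PySem.List.pyIdx?
  by_cases h0 : 0 ≤ w
  · exact ⟨w.toNat, by simp [h0, h2], by omega⟩
  · refine ⟨n - (-w).toNat, by simp [h0, h1], by omega⟩

theorem pyGetD_eq_of_idx {α : Type} (xs : List α) (w : Int) (j : Nat) (d : α)
    (h : PySem.List.pyIdx? xs.length w = some j) (hj : j < xs.length) :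
    PySem.List.pyGetD xs w d = xs[j] := by
  simp [PySem.List.pyGetD, PySem.List.pyGet?, h, List.getElem?_eq_getElem hj]

theorem pySetD_eq_of_idx {α : Type} (xs : List α) (w : Int) (j : Nat) (b : α)
    (h : PySem.List.pyIdx? xs.length w = some j) :
    PySem.List.pySetD xs w b = xs.set j b := by
  simp [PySem.List.pySetD, PySem.List.pySet?, h]

-- marking an in-range, unvisited vertex: length kept, unvisited count drops by one
theorem markFalse (vis : List Bool) (w : Int)
    (hw : PySem.Raise.InRange vis.length w)
    (hf : PySem.List.pyGetD vis w false = false) :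
    (PySem.List.pySetD vis w true).length = vis.length ∧
      fcnt (PySem.List.pySetD vis w true) + 1 = fcnt vis := by
  obtain ⟨j, hj, hjn⟩ := inRange_idx hw
  rw [pySetD_eq_of_idx vis w j true hj]
  rw [pyGetD_eq_of_idx vis w j false hj hjn] at hf
  constructor
  · simp
  · have h1 := List.count_set (a := true) (b := false) (l := vis) hjn
    have h2 : 0 < vis.count false := List.count_pos_iff.mpr (by
      rw [← hf]; exact List.getElem_mem hjn)
    simp [hf] at h1
    unfold fcnt
    omega

-- marking never increases the unvisited count (any index)
theorem fcnt_setTrue_le (vis : List Bool) (w : Int) :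
    fcnt (PySem.List.pySetD vis w true) ≤ fcnt vis := by
  unfold PySem.List.pySetD PySem.List.pySet?
  cases h : PySem.List.pyIdx? vis.length w with
  | none => simp
  | some j =>
    simp only [Option.map_some, Option.getD_some]
    by_cases hj : j < vis.length
    · have h1 := List.count_set (a := true) (b := false) (l := vis) hj
      simp only [show (true == false) = false by rfl] at h1
      unfold fcnt
      by_cases hb : vis[j] = false <;> simp [hb] at h1 <;> omega
    · rw [List.set_eq_of_length_le (by omega)]

-- a row of G has length at most the total edge count
theorem row_le_E (G : List (List Int)) (v : Int)
    (hv : PySem.Raise.InRange G.length v) :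
    (PySem.List.pyGetD G v []).length ≤ (G.map List.length).sum := by
  have hm : PySem.List.pyGetD G v [] ∈ G := PySem.List.pyGetD_mem G [] hv
  exact List.single_le_sum (by simp) _ (List.mem_map_of_mem hm)

-- A's DFS preserves the length of `visited` and never increases fcnt
theorem presN (G : List (List Int)) (f : Nat)
    (hd : ∀ (v : Int) (vis : List Bool) (st : List Int),
      (dfsA G f v vis st).1.length = vis.length ∧
        fcnt (dfsA G f v vis st).1 ≤ fcnt vis) :
    ∀ (ns : List Int) (vis : List Bool) (st : List Int),
      (dfsANbrs G f ns vis st).1.length = vis.length ∧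
        fcnt (dfsANbrs G f ns vis st).1 ≤ fcnt vis := by
  intro ns
  induction ns with
  | nil => intro vis st; simp [dfsANbrs]
  | cons w rest ih =>
    intro vis st
    rw [dfsANbrs]
    by_cases h : PySem.List.pyGetD vis w false = true
    · simp only [h, if_true]; exact ih vis st
    · simp only [eq_false_of_ne_true h, Bool.false_eq_true, if_false]
      obtain ⟨h1, h2⟩ := hd w vis st
      obtain ⟨h3, h4⟩ := ih (dfsA G f w vis st).1 (dfsA G f w vis st).2
      exact ⟨by rw [h3, h1], le_trans h4 h2⟩

theorem presD (G : List (List Int)) :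
    ∀ (f : Nat) (v : Int) (vis : List Bool) (st : List Int),
      (dfsA G f v vis st).1.length = vis.length ∧
        fcnt (dfsA G f v vis st).1 ≤ fcnt vis := by
  intro f
  induction f with
  | zero => intro v vis st; simp [dfsA]
  | succ f ih =>
    intro v vis st
    rw [dfsA]
    obtain ⟨h1, h2⟩ := presN G f ih (PySem.List.pyGetD G v []) (PySem.List.pySetD vis v true) st
    refine ⟨by simpa [PySem.List.length_pySetD] using h1, le_trans h2 (fcnt_setTrue_le vis v)⟩

-- B's loop is fuel-irrelevant above costB
theorem costB_cons (G : List (List Int)) (p : Int × Int) (rest : List (Int × Int))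
    (vis : List Bool) : costB G (p :: rest) vis = frameCost G p + costB G rest vis := by
  simp [costB]; omega

theorem frameCost_pos (G : List (List Int)) (v i : Int)
    (h : i.toNat ≤ (PySem.List.pyGetD G v []).length) : 1 ≤ frameCost G (v, i) := by
  unfold frameCost; simp only; omega

theorem frameCost_eval (G : List (List Int)) (v i : Int) :
    frameCost G (v, i) = (PySem.List.pyGetD G v []).length + 1 - i.toNat := rfl

theorem loopB_indep (G : List (List Int)) (hPre : Pre_hasHamiltonianPath G) :
    ∀ (f g : Nat) (stack : List (Int × Int)) (vis : List Bool) (ord : List Int),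
      vis.length = G.length → stackOK G stack →
      costB G stack vis ≤ f → costB G stack vis ≤ g →
      loopB G f stack vis ord = loopB G g stack vis ord := by
  intro f
  induction f with
  | zero =>
    intro g stack vis ord hlen hok hcf hcg
    cases stack with
    | nil => rw [loopB_nil, loopB_nil]
    | cons p rest =>
      exfalso
      obtain ⟨v, i⟩ := p
      obtain ⟨hv, hi0, hile⟩ := hok v i (List.mem_cons_self)
      have h1 : 1 ≤ frameCost G (v, i) := frameCost_pos G v i hile
      rw [costB_cons] at hcf
      omega
  | succ f ih =>
    intro g stack vis ord hlen hok hcf hcg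
    cases stack with
    | nil => rw [loopB_nil, loopB_nil]
    | cons p rest =>
      obtain ⟨v, i⟩ := p
      obtain ⟨hv, hi0, hile⟩ := hok v i (List.mem_cons_self)
      have h1 : 1 ≤ frameCost G (v, i) := frameCost_pos G v i hile
      have hpos : 1 ≤ costB G ((v, i) :: rest) vis := by rw [costB_cons]; omega
      obtain ⟨g', rfl⟩ : ∃ g', g = g' + 1 := ⟨g - 1, by omega⟩
      rw [loopB, loopB]
      simp only
      have hrest : stackOK G rest := fun u j hj => hok u j (List.mem_cons_of_mem _ hj)
      by_cases hlt : i < ((PySem.List.pyGetD G v []).length : Int)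
      · simp only [if_pos hlt]
        have hwmem : PySem.List.pyGetD (PySem.List.pyGetD G v []) i 0 ∈ PySem.List.pyGetD G v [] := by
          rw [PySem.List.pyGetD_eq_getElem _ _ hi0 hlt]
          exact List.getElem_mem (by omega)
        have hwrange : PySem.Raise.InRange G.length (PySem.List.pyGetD (PySem.List.pyGetD G v []) i 0) :=
          hPre _ (PySem.List.pyGetD_mem G [] hv) _ hwmem
        have hok1 : stackOK G ((v, i + 1) :: rest) := by
          intro u j hj
          rcases List.mem_cons.mp hj with h | h
          · obtain ⟨rfl, rfl⟩ := Prod.mk.injEq .. ▸ h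
            exact ⟨hv, by omega, by omega⟩
          · exact hrest u j h
        have hfc1 : frameCost G (v, i + 1) + 1 = frameCost G (v, i) := by
          rw [frameCost_eval, frameCost_eval]; omega
        by_cases hvw : PySem.List.pyGetD vis (PySem.List.pyGetD (PySem.List.pyGetD G v []) i 0) false = true
        · simp only [hvw, if_true]
          apply ih g' _ _ _ hlen hok1 <;> rw [costB_cons] <;> rw [costB_cons] at hcf hcg <;> omega
        · simp only [eq_false_of_ne_true hvw, Bool.false_eq_true, if_false]
          obtain ⟨hmlen, hmfc⟩ := markFalse vis _ (by rw [hlen]; exact hwrange) (eq_false_of_ne_true hvw)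
          have hE := row_le_E G _ hwrange
          have hok2 : stackOK G ((PySem.List.pyGetD (PySem.List.pyGetD G v []) i 0, 0) :: (v, i + 1) :: rest) := by
            intro u j hj
            rcases List.mem_cons.mp hj with h | h
            · obtain ⟨rfl, rfl⟩ := Prod.mk.injEq .. ▸ h
              exact ⟨hwrange, le_refl 0, by simp⟩
            · exact hok1 u j h
          obtain ⟨fm, hfm⟩ : ∃ fm, fcnt vis = fm + 1 :=
            ⟨fcnt (PySem.List.pySetD vis (PySem.List.pyGetD (PySem.List.pyGetD G v []) i 0) true), by omega⟩
          have hmul : fcnt vis * ((G.map List.length).sum + 2)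
              = fm * ((G.map List.length).sum + 2) + ((G.map List.length).sum + 2) := by
            rw [hfm, Nat.succ_mul]
          have hmul2 : fcnt (PySem.List.pySetD vis (PySem.List.pyGetD (PySem.List.pyGetD G v []) i 0) true)
              * ((G.map List.length).sum + 2) = fm * ((G.map List.length).sum + 2) := by
            rw [show fcnt (PySem.List.pySetD vis (PySem.List.pyGetD (PySem.List.pyGetD G v []) i 0) true) = fm by omega]
          have key : costB G ((PySem.List.pyGetD (PySem.List.pyGetD G v []) i 0, 0) :: (v, i + 1) :: rest)
              (PySem.List.pySetD vis (PySem.List.pyGetD (PySem.List.pyGetD G v []) i 0) true) + 2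
              ≤ costB G ((v, i) :: rest) vis := by
            rw [costB_cons, costB_cons, costB_cons]
            unfold costB
            rw [hmul, hmul2, frameCost_eval, frameCost_eval, frameCost_eval]
            omega
          apply ih g' _ _ _ (by rw [hmlen, hlen]) hok2 <;> omega
      · simp only [if_neg hlt]
        have hkey : costB G rest vis + 1 ≤ costB G ((v, i) :: rest) vis := by
          rw [costB_cons]; omega
        apply ih g' _ _ _ hlen hrest <;> omega

-- cost of pushing a fresh frame for an unvisited in-range vertex: drops by ≥ 2
theorem push_cost (G : List (List Int)) (rest : List (Int × Int)) (vis : List Bool)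
    (v i w : Int) (hw : PySem.Raise.InRange G.length w)
    (hvw : PySem.List.pyGetD vis w false = false) (hlen : vis.length = G.length)
    (hi0 : 0 ≤ i) (hlt : i.toNat < (PySem.List.pyGetD G v []).length) :
    costB G ((w, 0) :: (v, i + 1) :: rest) (PySem.List.pySetD vis w true) + 2
      ≤ costB G ((v, i) :: rest) vis := by
  obtain ⟨hmlen, hmfc⟩ := markFalse vis w (by rw [hlen]; exact hw) hvw
  have hE := row_le_E G w hw
  obtain ⟨fm, hfm⟩ : ∃ fm, fcnt vis = fm + 1 := ⟨fcnt (PySem.List.pySetD vis w true), by omega⟩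
  have hmul : fcnt vis * ((G.map List.length).sum + 2)
      = fm * ((G.map List.length).sum + 2) + ((G.map List.length).sum + 2) := by
    rw [hfm, Nat.succ_mul]
  have hmul2 : fcnt (PySem.List.pySetD vis w true) * ((G.map List.length).sum + 2)
      = fm * ((G.map List.length).sum + 2) := by
    rw [show fcnt (PySem.List.pySetD vis w true) = fm by omega]
  rw [costB_cons, costB_cons, costB_cons]
  unfold costB
  rw [hmul, hmul2, frameCost_eval, frameCost_eval, frameCost_eval]
  omega

-- MAIN BRIDGE: processing the top frame (v, i) of B's stack is exactly A's recursive
-- neighbour loop from index i followed by appending v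
theorem bridge (G : List (List Int)) (hPre : Pre_hasHamiltonianPath G) :
    ∀ (m k : Nat) (vis : List Bool) (v i : Int) (rest : List (Int × Int))
      (ord : List Int) (fA fB fB' : Nat),
      fcnt vis ≤ m →
      ((PySem.List.pyGetD G v []).length - i.toNat) ≤ k →
      vis.length = G.length →
      PySem.Raise.InRange G.length v → 0 ≤ i →
      i.toNat ≤ (PySem.List.pyGetD G v []).length →
      stackOK G rest →
      fcnt vis ≤ fA →
      costB G ((v, i) :: rest) vis ≤ fB →
      costB G rest (dfsANbrs G fA ((PySem.List.pyGetD G v []).drop i.toNat) vis ord).1 ≤ fB' →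
      loopB G fB ((v, i) :: rest) vis ord
        = loopB G fB' rest
            (dfsANbrs G fA ((PySem.List.pyGetD G v []).drop i.toNat) vis ord).1
            ((dfsANbrs G fA ((PySem.List.pyGetD G v []).drop i.toNat) vis ord).2 ++ [v]) := by
  intro m
  induction m using Nat.strong_induction_on with
  | _ m IHm =>
  intro k
  induction k using Nat.strong_induction_on with
  | _ k IHk =>
  intro vis v i rest ord fA fB fB' hm hk hlen hv hi0 hile hrest hfA hcB hcB'
  have h1 : 1 ≤ frameCost G (v, i) := frameCost_pos G v i hile
  have hpos : 1 ≤ costB G ((v, i) :: rest) vis := by rw [costB_cons]; omega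
  obtain ⟨fb, rfl⟩ : ∃ fb, fB = fb + 1 := ⟨fB - 1, by omega⟩
  rw [loopB]
  simp only
  by_cases hlt : i < ((PySem.List.pyGetD G v []).length : Int)
  · simp only [if_pos hlt]
    have htoNat : (i + 1).toNat = i.toNat + 1 := by omega
    have hdrop : (PySem.List.pyGetD G v []).drop i.toNat
        = PySem.List.pyGetD (PySem.List.pyGetD G v []) i 0
            :: (PySem.List.pyGetD G v []).drop ((i + 1).toNat) := by
      rw [PySem.List.pyGetD_eq_getElem _ _ hi0 hlt, htoNat]
      exact List.drop_eq_getElem_cons (by omega)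
    have hwmem : PySem.List.pyGetD (PySem.List.pyGetD G v []) i 0 ∈ PySem.List.pyGetD G v [] := by
      rw [PySem.List.pyGetD_eq_getElem _ _ hi0 hlt]
      exact List.getElem_mem (by omega)
    have hwrange : PySem.Raise.InRange G.length (PySem.List.pyGetD (PySem.List.pyGetD G v []) i 0) :=
      hPre _ (PySem.List.pyGetD_mem G [] hv) _ hwmem
    have hfc1 : frameCost G (v, i + 1) + 1 = frameCost G (v, i) := by
      rw [frameCost_eval, frameCost_eval]; omega
    by_cases hvw : PySem.List.pyGetD vis (PySem.List.pyGetD (PySem.List.pyGetD G v []) i 0) false = true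
    · -- neighbour already visited: A skips it, B only advances the index
      simp only [hvw, if_true]
      have hA : dfsANbrs G fA ((PySem.List.pyGetD G v []).drop i.toNat) vis ord
          = dfsANbrs G fA ((PySem.List.pyGetD G v []).drop ((i + 1).toNat)) vis ord := by
        rw [hdrop, dfsANbrs, if_pos hvw]
      rw [hA]
      rw [hA] at hcB'
      exact IHk (k - 1) (by omega) vis v (i + 1) rest ord fA fb fB' hm (by omega) hlen hv
        (by omega) (by omega) hrest hfA (by rw [costB_cons] at hcB ⊢; omega) hcB'
    · -- fresh neighbour: B pushes a frame, A recurses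
      simp only [eq_false_of_ne_true hvw, Bool.false_eq_true, if_false]
      obtain ⟨hmlen, hmfc⟩ := markFalse vis _ (by rw [hlen]; exact hwrange) (eq_false_of_ne_true hvw)
      obtain ⟨fa, rfl⟩ : ∃ fa, fA = fa + 1 := ⟨fA - 1, by omega⟩
      have hA : dfsANbrs G (fa + 1) ((PySem.List.pyGetD G v []).drop i.toNat) vis ord
          = dfsANbrs G (fa + 1) ((PySem.List.pyGetD G v []).drop ((i + 1).toNat))
              (dfsANbrs G fa (PySem.List.pyGetD G (PySem.List.pyGetD (PySem.List.pyGetD G v []) i 0) [])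
                (PySem.List.pySetD vis (PySem.List.pyGetD (PySem.List.pyGetD G v []) i 0) true) ord).1
              ((dfsANbrs G fa (PySem.List.pyGetD G (PySem.List.pyGetD (PySem.List.pyGetD G v []) i 0) [])
                (PySem.List.pySetD vis (PySem.List.pyGetD (PySem.List.pyGetD G v []) i 0) true) ord).2
                ++ [PySem.List.pyGetD (PySem.List.pyGetD G v []) i 0]) := by
        rw [hdrop, dfsANbrs, if_neg (by simp [eq_false_of_ne_true hvw]), dfsA]
      rw [hA]
      rw [hA] at hcB'
      have hok1 : stackOK G ((v, i + 1) :: rest) := by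
        intro u j hj
        rcases List.mem_cons.mp hj with h | h
        · obtain ⟨rfl, rfl⟩ := Prod.mk.injEq .. ▸ h
          exact ⟨hv, by omega, by omega⟩
        · exact hrest u j h
      have hpc := push_cost G rest vis v i _ hwrange (eq_false_of_ne_true hvw) hlen hi0 (by omega)
      obtain ⟨hplen, hpfc⟩ := presN G fa (presD G fa)
        (PySem.List.pyGetD G (PySem.List.pyGetD (PySem.List.pyGetD G v []) i 0) [])
        (PySem.List.pySetD vis (PySem.List.pyGetD (PySem.List.pyGetD G v []) i 0) true) ord
      have step1 := IHm (m - 1) (by omega)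
        ((PySem.List.pyGetD G (PySem.List.pyGetD (PySem.List.pyGetD G v []) i 0) []).length)
        (PySem.List.pySetD vis (PySem.List.pyGetD (PySem.List.pyGetD G v []) i 0) true)
        (PySem.List.pyGetD (PySem.List.pyGetD G v []) i 0) 0 ((v, i + 1) :: rest) ord fa fb
        (costB G ((v, i + 1) :: rest)
          (dfsANbrs G fa (PySem.List.pyGetD G (PySem.List.pyGetD (PySem.List.pyGetD G v []) i 0) [])
            (PySem.List.pySetD vis (PySem.List.pyGetD (PySem.List.pyGetD G v []) i 0) true) ord).1)
        (by omega) (by simp) (by rw [hmlen, hlen]) hwrange (le_refl 0) (by simp) hok1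
        (by omega) (by omega) (le_refl _)
      simp only [Int.toNat_zero, List.drop_zero] at step1
      rw [step1]
      have step2 := IHm (m - 1) (by omega)
        ((PySem.List.pyGetD G v []).length - (i + 1).toNat)
        (dfsANbrs G fa (PySem.List.pyGetD G (PySem.List.pyGetD (PySem.List.pyGetD G v []) i 0) [])
          (PySem.List.pySetD vis (PySem.List.pyGetD (PySem.List.pyGetD G v []) i 0) true) ord).1
        v (i + 1) rest
        ((dfsANbrs G fa (PySem.List.pyGetD G (PySem.List.pyGetD (PySem.List.pyGetD G v []) i 0) [])
          (PySem.List.pySetD vis (PySem.List.pyGetD (PySem.List.pyGetD G v []) i 0) true) ord).2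
          ++ [PySem.List.pyGetD (PySem.List.pyGetD G v []) i 0])
        (fa + 1)
        (costB G ((v, i + 1) :: rest)
          (dfsANbrs G fa (PySem.List.pyGetD G (PySem.List.pyGetD (PySem.List.pyGetD G v []) i 0) [])
            (PySem.List.pySetD vis (PySem.List.pyGetD (PySem.List.pyGetD G v []) i 0) true) ord).1)
        fB'
        (by omega) (le_refl _) (by rw [hplen, hmlen, hlen]) hv (by omega) (by omega) hrest
        (by omega) (le_refl _) hcB'
      exact step2
  · -- i ≥ len(G[v]): A's neighbour loop is done, B pops and appends v
    simp only [if_neg hlt]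
    have hnil : (PySem.List.pyGetD G v []).drop i.toNat = [] :=
      List.drop_eq_nil_of_le (by omega)
    rw [hnil] at hcB' ⊢
    rw [dfsANbrs] at hcB' ⊢
    exact loopB_indep G hPre fb fB' rest vis (ord ++ [v]) hlen hrest
      (by rw [costB_cons] at hcB; omega) hcB'

-- the two top-level folds produce the same (visited, order) pair
theorem fold_eq (G : List (List Int)) (hPre : Pre_hasHamiltonianPath G) :
    ∀ (l : List Int) (vis : List Bool) (ord : List Int),
      vis.length = G.length →
      (∀ x ∈ l, 0 ≤ x ∧ x < (G.length : Int)) →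
      l.foldl
        (fun (acc : List Bool × List Int) v =>
          if PySem.List.pyGetD acc.1 v false then acc
          else loopB G ((G.length + 1) * ((G.map List.length).sum + 2)) [(v, 0)]
                 (PySem.List.pySetD acc.1 v true) acc.2)
        (vis, ord)
      = l.foldl
        (fun (acc : List Bool × List Int) v =>
          if PySem.List.pyGetD acc.1 v false then acc
          else dfsA G (G.length + 1) v acc.1 acc.2)
        (vis, ord) := by
  intro l
  induction l with
  | nil => intro vis ord _ _; rfl
  | cons v t ih =>
    intro vis ord hlen hmem
    obtain ⟨hv0, hvn⟩ := hmem v (List.mem_cons_self)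
    have hv : PySem.Raise.InRange G.length v := ⟨by omega, hvn⟩
    have hmem' : ∀ x ∈ t, 0 ≤ x ∧ x < (G.length : Int) :=
      fun x hx => hmem x (List.mem_cons_of_mem _ hx)
    simp only [List.foldl_cons]
    by_cases hvis : PySem.List.pyGetD vis v false = true
    · simp only [hvis, if_true]
      exact ih vis ord hlen hmem'
    · simp only [eq_false_of_ne_true hvis, Bool.false_eq_true, if_false]
      obtain ⟨hmlen, hmfc⟩ := markFalse vis v (by rw [hlen]; exact hv) (eq_false_of_ne_true hvis)
      have hfn : fcnt (PySem.List.pySetD vis v true) ≤ G.length := by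
        have := List.count_le_length (l := PySem.List.pySetD vis v true) (a := false)
        unfold fcnt; omega
      have hE := row_le_E G v hv
      have h2 : fcnt (PySem.List.pySetD vis v true) * ((G.map List.length).sum + 2)
          ≤ G.length * ((G.map List.length).sum + 2) := Nat.mul_le_mul_right _ hfn
      have hb := bridge G hPre (fcnt (PySem.List.pySetD vis v true))
        ((PySem.List.pyGetD G v []).length)
        (PySem.List.pySetD vis v true) v 0 [] ord G.length
        ((G.length + 1) * ((G.map List.length).sum + 2))
        (costB G []
          (dfsANbrs G G.length (PySem.List.pyGetD G v [])
            (PySem.List.pySetD vis v true) ord).1)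
        (le_refl _) (by simp) (by rw [hmlen, hlen]) hv (le_refl 0) (by simp)
        (by intro u j hj; simp at hj) hfn
        (by unfold costB frameCost
            simp only [List.map_cons, List.map_nil, List.sum_cons, List.sum_nil, Int.toNat_zero]
            rw [Nat.succ_mul]
            omega)
        (by simp only [Int.toNat_zero, List.drop_zero]; exact le_refl _)
      simp only [Int.toNat_zero, List.drop_zero] at hb
      rw [hb, loopB_nil]
      rw [show dfsA G (G.length + 1) v vis ord
          = ((dfsANbrs G G.length (PySem.List.pyGetD G v [])
              (PySem.List.pySetD vis v true) ord).1,
             (dfsANbrs G G.length (PySem.List.pyGetD G v [])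
              (PySem.List.pySetD vis v true) ord).2 ++ [v]) from by rw [dfsA]]
      obtain ⟨hplen, _⟩ := presN G G.length (presD G G.length)
        (PySem.List.pyGetD G v []) (PySem.List.pySetD vis v true) ord
      exact ih _ _ (by rw [hplen, hmlen, hlen]) hmem'

theorem checkA_iff (G : List (List Int)) :
    ∀ l : List Int, checkA G l = true ↔
      List.IsChain (fun u v => ((PySem.List.pyGetD G u []).contains v) = true) l := by
  intro l
  match l with
  | [] => simp [checkA]
  | [u] => simp [checkA]
  | u :: v :: rest =>
    rw [checkA, List.isChain_cons_cons, ← checkA_iff G (v :: rest)]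
    cases ((PySem.List.pyGetD G u []).contains v) <;> simp

theorem checkB_iff (G : List (List Int)) :
    ∀ l : List Int, checkB G l = true ↔
      List.IsChain (fun a b => ((PySem.List.pyGetD G b []).contains a) = true) l := by
  intro l
  match l with
  | [] => simp [checkB]
  | [a] => simp [checkB]
  | a :: b :: rest =>
    rw [checkB, List.isChain_cons_cons, ← checkB_iff G (b :: rest)]
    cases ((PySem.List.pyGetD G b []).contains a) <;> simp

theorem checkA_reverse (G : List (List Int)) (l : List Int) :
    checkA G l.reverse = checkB G l := by
  rw [Bool.eq_iff_iff, checkA_iff, checkB_iff]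
  exact List.isChain_reverse

-- ===== VERDICT (by name: the statement is the Claim_ definition above) =====
theorem hasHamiltonianPath_spec : Claim_equal_hasHamiltonianPath := by
  intro G _ hPre
  unfold Spec_hasHamiltonianPath hasHamiltonianPath hasHamiltonianPath_alt
  simp only [PySem.List.slice?_none_none_neg_one, Option.getD_some]
  rw [← fold_eq G hPre _ (List.replicate G.length false) []
    (by simp) (by intro x hx; exact (PySem.List.mem_pyRange_one.mp hx))]
  exact checkA_reverse G _
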